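-- pv_equiv track=rewrite | github.com/natachadoutreleau/info3TD | TD3/nutritionfacts.py | enumerateAllPossibleMeals
-- ===== SOURCE A (Python) =====
-- def enumerateAllPossibleMeals(ProteinSources, CarbSources, FatSources, Vegetables, Fruits, Extras):
--   """
--   Parameters passed in data mode: [all]
--   Parameters passed in data/result mode: [none]
--   Parameters passed in result mode: [none]
--   Preconditions:
--     - ProteinSources, CarbSources, FatSources, Vegetables, Fruits and Extras are non-empty lists of strings
--   Postconditions: [none]
--   Result: The list of all possible meals, with a meal defined as list of 6 items (one source of proteins,
--   one source of carbohydrate, one source of fat, one vegetable, one fruit and one extra, in this order).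
--   """
--   all_meals = []
--   for prot_source in ProteinSources:
--     for carb in CarbSources:
--         for fat in FatSources:
--             for veg in Vegetables:
--               for fruit in Fruits:
--                 for extra in Extras:
--                   meal = [prot_source, carb, fat, veg, fruit, extra]
--                   all_meals.append(meal)
--   return all_meals
-- ===== SOURCE B (Python) =====
-- def enumerateAllPossibleMeals(ProteinSources, CarbSources, FatSources, Vegetables, Fruits, Extras):
--     # Incremental fold: extend partial meals one ingredient category at a time.
--     result = [[]]
--     for source in [ProteinSources, CarbSources, FatSources, Vegetables, Fruits, Extras]:
--         result = [meal + [item] for meal in result for item in source]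
--     return result
-- ===== Notes on version B (the rewrite author's own statement) =====
-- stated objective: simpler
-- what changed: Replaced six fixed nested loops building each meal at the innermost level by a single fold over the list of the six ingredient lists that extends all partial meals by one ingredient per pass.
import Mathlib
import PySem

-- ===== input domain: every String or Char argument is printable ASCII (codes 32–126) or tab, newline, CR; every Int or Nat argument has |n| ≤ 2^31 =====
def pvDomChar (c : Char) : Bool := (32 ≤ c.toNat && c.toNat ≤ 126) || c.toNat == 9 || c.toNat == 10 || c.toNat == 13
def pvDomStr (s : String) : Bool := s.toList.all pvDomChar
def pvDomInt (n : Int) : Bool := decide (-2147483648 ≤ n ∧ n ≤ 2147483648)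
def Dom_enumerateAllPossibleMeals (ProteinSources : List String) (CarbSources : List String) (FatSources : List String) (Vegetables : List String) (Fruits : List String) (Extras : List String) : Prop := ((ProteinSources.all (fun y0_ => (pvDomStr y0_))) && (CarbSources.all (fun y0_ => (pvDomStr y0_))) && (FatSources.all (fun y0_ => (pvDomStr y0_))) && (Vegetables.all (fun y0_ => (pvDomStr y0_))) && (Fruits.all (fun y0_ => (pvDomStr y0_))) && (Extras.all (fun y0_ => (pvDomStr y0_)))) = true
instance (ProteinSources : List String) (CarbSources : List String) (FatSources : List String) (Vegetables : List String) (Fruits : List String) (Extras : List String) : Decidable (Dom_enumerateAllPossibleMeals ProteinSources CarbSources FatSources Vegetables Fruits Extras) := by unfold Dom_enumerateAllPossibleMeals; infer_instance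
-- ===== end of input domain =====

-- B replaces six fixed nested loops by a single fold over the six ingredient lists (objective: simpler).


-- ===== PORT A =====
-- Six nested loops, appending one meal at a time (transliteration of A).
def enumerateAllPossibleMeals (ProteinSources : List String) (CarbSources : List String) (FatSources : List String) (Vegetables : List String) (Fruits : List String) (Extras : List String) : List (List String) :=
  ProteinSources.foldl (fun all_meals prot_source =>
    CarbSources.foldl (fun all_meals carb =>
      FatSources.foldl (fun all_meals fat =>
        Vegetables.foldl (fun all_meals veg =>
          Fruits.foldl (fun all_meals fruit =>
            Extras.foldl (fun all_meals extra =>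
              all_meals ++ [[prot_source, carb, fat, veg, fruit, extra]])
              all_meals)
            all_meals)
          all_meals)
        all_meals)
      all_meals)
    []

-- ===== PORT B =====
-- B: one fold over the list of the six ingredient lists, extending partial meals.
def extendMeals (result : List (List String)) (source : List String) : List (List String) :=
  result.flatMap (fun meal => source.map (fun item => meal ++ [item]))

def enumerateAllPossibleMeals_alt (ProteinSources : List String) (CarbSources : List String) (FatSources : List String) (Vegetables : List String) (Fruits : List String) (Extras : List String) : List (List String) :=
  [ProteinSources, CarbSources, FatSources, Vegetables, Fruits, Extras].foldl extendMeals [[]]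

-- ===== PRECONDITION & SPEC =====
def Spec_enumerateAllPossibleMeals (ProteinSources : List String) (CarbSources : List String) (FatSources : List String) (Vegetables : List String) (Fruits : List String) (Extras : List String) (out : List (List String)) : Prop := out = enumerateAllPossibleMeals_alt ProteinSources CarbSources FatSources Vegetables Fruits Extras
instance (ProteinSources : List String) (CarbSources : List String) (FatSources : List String) (Vegetables : List String) (Fruits : List String) (Extras : List String) (out : List (List String)) : Decidable (Spec_enumerateAllPossibleMeals ProteinSources CarbSources FatSources Vegetables Fruits Extras out) := by unfold Spec_enumerateAllPossibleMeals; infer_instance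

-- ===== CLAIM (what is proved, stated in full; the proofs are below) =====
def Claim_equal_enumerateAllPossibleMeals : Prop := ∀ (ProteinSources : List String) (CarbSources : List String) (FatSources : List String) (Vegetables : List String) (Fruits : List String) (Extras : List String), Dom_enumerateAllPossibleMeals ProteinSources CarbSources FatSources Vegetables Fruits Extras → Spec_enumerateAllPossibleMeals ProteinSources CarbSources FatSources Vegetables Fruits Extras (enumerateAllPossibleMeals ProteinSources CarbSources FatSources Vegetables Fruits Extras)

-- ===== LEMMAS AND PROOFS =====

-- ===== VERDICT (by name: the statement is the Claim_ definition above) =====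
theorem enumerateAllPossibleMeals_spec : Claim_equal_enumerateAllPossibleMeals := by
  intro P C F V Fr E _
  show _ = _
  simp only [enumerateAllPossibleMeals, enumerateAllPossibleMeals_alt, extendMeals,
    List.foldl_cons, List.foldl_nil,
    PySem.List.foldl_append_singleton_eq_map, PySem.List.foldl_append_eq_flatMap,
    List.flatMap_assoc, List.flatMap_map,
    List.flatMap_cons, List.flatMap_nil, List.append_nil, List.nil_append,
    List.cons_append]
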